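-- pv_equiv track=rewrite | github.com/najahiiii/bonkrr | bunkrr/banner.py | render_banner
-- ===== SOURCE A (Python) =====
-- from typing import Sequence
--
-- _ICON_ASCII = (
--     "        +++++++++++++++++++",
--     "        +++++++++++++++++++",
--     "        ++++           ++++",
--     "        +++++ ++++++  +++++",
--     "        ++ + +++++++++ + ++",
--     "        ++  +++ +++ +++  ++",
--     "        ++ +++++++++++++ ++",
--     "        ++ ++ +++++++ ++ ++",
--     "        ++ ++++++ ++++++ ++",
--     "        ++ +++++   +++++ ++",
--     "        ++ ++++++ ++++++ ++",
--     "        ++ ++ +++++++ ++ ++",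
--     "        ++ +++++++++++++ ++",
--     "        ++  +++ +++ +++  ++",
--     "        ++ + +++++++++ + ++",
--     "        +++++ ++++++  +++++",
--     "        ++++           ++++",
--     "        +++++++++++++++++++",
--     "        +++++++++++++++++++",
-- )
--
-- _BUNKR_ASCII = (
--     " ____  _   _ _   _ _  __ ____  ",
--     "| __ )| | | | \\ | | |/ /|  _ \\ ",
--     "|  _ \\| | | |  \\| | ' / | |_) |",
--     "| |_) | |_| | |\\  | . \\ |  _ < ",
--     "|____/ \\___/|_| \\_|_|\\_\\|_| \\_\\",
-- )
--
-- def _pad_lines(lines: tuple[str, ...], target_height: int, centered: bool) -> list[str]: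
--     """Pad lines to target height. Use vertical-centering when requested."""
--     out = list(lines)
--     missing = target_height - len(out)
--     if missing <= 0:
--         return out
--
--     if centered:
--         top = missing // 2
--         bottom = missing - top
--         return ([""] * top) + out + ([""] * bottom)
--
--     out.extend([""] * missing)
--     return out
--
-- def render_banner(
--     separator: str = " | ",
--     extra_right_lines: Sequence[str] | None = None,
-- ) -> str:
--     """Render banner as `ascii icon | ascii teks`."""
--     right_block = list(_BUNKR_ASCII)
--     if extra_right_lines:
--         right_block.extend(str(line) for line in extra_right_lines)
--
--     right_block_tuple = tuple(right_block)
--     height = max(len(_ICON_ASCII), len(right_block_tuple))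
--     left = _pad_lines(_ICON_ASCII, height, centered=False)
--     right = _pad_lines(right_block_tuple, height, centered=False)
--     left_width = max(len(line) for line in left)
--
--     rows = [
--         f"{left_line.ljust(left_width)}{separator}{right_line}"
--         for left_line, right_line in zip(left, right)
--     ]
--     return "\n".join(rows)
-- ===== SOURCE B (Python) =====
-- from typing import Sequence
--
-- _ICON_ASCII = (
--     "        +++++++++++++++++++",
--     "        +++++++++++++++++++",
--     "        ++++           ++++",
--     "        +++++ ++++++  +++++",
--     "        ++ + +++++++++ + ++",
--     "        ++  +++ +++ +++  ++",
--     "        ++ +++++++++++++ ++",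
--     "        ++ ++ +++++++ ++ ++",
--     "        ++ ++++++ ++++++ ++",
--     "        ++ +++++   +++++ ++",
--     "        ++ ++++++ ++++++ ++",
--     "        ++ ++ +++++++ ++ ++",
--     "        ++ +++++++++++++ ++",
--     "        ++  +++ +++ +++  ++",
--     "        ++ + +++++++++ + ++",
--     "        +++++ ++++++  +++++",
--     "        ++++           ++++",
--     "        +++++++++++++++++++",
--     "        +++++++++++++++++++",
-- )
--
-- _BUNKR_ASCII = (
--     " ____  _   _ _   _ _  __ ____  ",
--     "| __ )| | | | \\ | | |/ /|  _ \\ ",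
--     "|  _ \\| | | |  \\| | ' / | |_) |",
--     "| |_) | |_| | |\\  | . \\ |  _ < ",
--     "|____/ \\___/|_| \\_|_|\\_\\|_| \\_\\",
-- )
--
--
-- def render_banner(
--     separator: str = " | ",
--     extra_right_lines: Sequence[str] | None = None,
-- ) -> str:
--     """Render banner in two stages: one row per icon line, then overflow rows.
--
--     All icon lines share the same width, so no ljust/width computation is
--     needed: stage 1 pairs each icon line with the next right line (an iterator,
--     '' once exhausted); stage 2 emits the remaining right lines under a blank
--     left column of that common width."""
--     right_block = list(_BUNKR_ASCII)
--     if extra_right_lines: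
--         right_block.extend(str(line) for line in extra_right_lines)
--
--     it = iter(right_block)
--     rows = [icon_line + separator + next(it, "") for icon_line in _ICON_ASCII]
--     blank = " " * len(_ICON_ASCII[0])
--     rows.extend(blank + separator + rest for rest in it)
--     return "\n".join(rows)
-- ===== Notes on version B (the rewrite author's own statement) =====
-- stated objective: simpler
-- what changed: Replaces the pad-to-common-height-then-zip pipeline (and the _pad_lines helper and left_width computation) with a two-stage build: one row per icon line consuming right lines from an iterator (empty once exhausted), then the leftover right lines emitted under a constant blank left column; correct because all icon lines share one width, so ljust is the identity on them.
import Mathlib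
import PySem

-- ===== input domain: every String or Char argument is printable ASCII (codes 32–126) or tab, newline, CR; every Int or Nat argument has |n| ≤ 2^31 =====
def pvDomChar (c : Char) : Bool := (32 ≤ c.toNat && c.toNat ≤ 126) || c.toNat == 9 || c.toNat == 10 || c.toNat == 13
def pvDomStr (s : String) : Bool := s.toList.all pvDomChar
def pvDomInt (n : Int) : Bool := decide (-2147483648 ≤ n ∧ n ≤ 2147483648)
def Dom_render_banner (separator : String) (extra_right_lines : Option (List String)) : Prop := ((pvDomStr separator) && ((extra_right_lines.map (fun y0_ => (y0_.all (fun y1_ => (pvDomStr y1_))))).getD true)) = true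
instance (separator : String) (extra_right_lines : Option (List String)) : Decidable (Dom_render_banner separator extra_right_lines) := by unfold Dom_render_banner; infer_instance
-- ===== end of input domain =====

-- B renders in two stages (icon rows consuming right lines from an iterator, then overflow rows
-- under a constant blank left column), with no width computation or padding lists (objective: simpler).

-- ===== PORT A =====
def pvIcon : List String := [
  "        +++++++++++++++++++",
  "        +++++++++++++++++++",
  "        ++++           ++++",
  "        +++++ ++++++  +++++",
  "        ++ + +++++++++ + ++",
  "        ++  +++ +++ +++  ++",
  "        ++ +++++++++++++ ++",
  "        ++ ++ +++++++ ++ ++",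
  "        ++ ++++++ ++++++ ++",
  "        ++ +++++   +++++ ++",
  "        ++ ++++++ ++++++ ++",
  "        ++ ++ +++++++ ++ ++",
  "        ++ +++++++++++++ ++",
  "        ++  +++ +++ +++  ++",
  "        ++ + +++++++++ + ++",
  "        +++++ ++++++  +++++",
  "        ++++           ++++",
  "        +++++++++++++++++++",
  "        +++++++++++++++++++"
]

def pvBunkr : List String := [
  " ____  _   _ _   _ _  __ ____  ",
  "| __ )| | | | \\ | | |/ /|  _ \\ ",
  "|  _ \\| | | |  \\| | ' / | |_) |",
  "| |_) | |_| | |\\  | . \\ |  _ < ",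
  "|____/ \\___/|_| \\_|_|\\_\\|_| \\_\\"
]

-- hand port of str.ljust(width) (exact: pads with spaces on the right, only when width > len(s))
def pvLjust (s : String) (w : Int) : List Char :=
  s.toList ++ List.replicate (w - PySem.Str.len s).toNat ' '

def pvPadLines (lines : List String) (target : Int) (centered : Bool) : List String :=
  let out := lines
  let missing : Int := target - PySem.List.len out
  if missing ≤ 0 then out
  else if centered then
    let top := PySem.Int.floordiv missing 2
    let bottom := missing - top
    List.replicate top.toNat "" ++ out ++ List.replicate bottom.toNat ""
  else out ++ List.replicate missing.toNat ""

def render_banner (separator : String) (extra_right_lines : Option (List String)) : String :=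
  -- `if extra_right_lines:` skips a missing or empty sequence; str() applied to a str is the identity
  let right_block : List String :=
    match extra_right_lines with
    | some (l :: ls) => pvBunkr ++ (l :: ls)
    | _ => pvBunkr
  let height : Int := max (PySem.List.len pvIcon) (PySem.List.len right_block)
  let left := pvPadLines pvIcon height false
  let right := pvPadLines right_block height false
  -- max(len(line) for line in left): `left` is never empty (it contains the icon lines)
  let left_width : Int :=
    match left.map PySem.Str.len with
    | [] => 0
    | x :: t => t.foldl max x
  let rows := (left.zip right).map (fun p =>
    String.ofList (pvLjust p.1 left_width ++ separator.toList ++ p.2.toList))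
  PySem.Str.join "\n" rows

-- ===== PORT B =====
-- stage 1: the list comprehension over _ICON_ASCII consuming `next(it, "")`; the state carried by
-- the iterator is the list of right lines not yet consumed, returned alongside the rows.
def pvRows1 (sep : String) : List String → List String → List String × List String
  | [], rem => ([], rem)
  | ic :: t, rem =>
      let hd := match rem with | [] => "" | x :: _ => x
      let tl := match rem with | [] => ([] : List String) | _ :: xs => xs
      let rest := pvRows1 sep t tl
      (String.ofList (ic.toList ++ sep.toList ++ hd.toList) :: rest.1, rest.2)

def render_banner_alt (separator : String) (extra_right_lines : Option (List String)) : String :=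
  let right_block : List String :=
    match extra_right_lines with
    | none => pvBunkr
    | some [] => pvBunkr
    | some (l :: ls) => pvBunkr ++ (l :: ls)
  let st := pvRows1 separator pvIcon right_block
  -- " " * len(_ICON_ASCII[0]) — pvIcon is a nonempty constant, so [0] is its head
  let blank : List Char := List.replicate (PySem.Str.len (pvIcon.headD "")).toNat ' '
  let rows := st.1 ++ st.2.map (fun rest =>
    String.ofList (blank ++ separator.toList ++ rest.toList))
  PySem.Str.join "\n" rows

-- ===== PRECONDITION & SPEC =====
def Spec_render_banner (separator : String) (extra_right_lines : Option (List String)) (out : String) : Prop := out = render_banner_alt separator extra_right_lines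
instance (separator : String) (extra_right_lines : Option (List String)) (out : String) : Decidable (Spec_render_banner separator extra_right_lines out) := by unfold Spec_render_banner; infer_instance

-- ===== CLAIM (what is proved, stated in full; the proofs are below) =====
def Claim_equal_render_banner : Prop := ∀ (separator : String) (extra_right_lines : Option (List String)), Dom_render_banner separator extra_right_lines → Spec_render_banner separator extra_right_lines (render_banner separator extra_right_lines)

-- ===== LEMMAS AND PROOFS =====

lemma pvPadLines_of_le (xs : List String) (t : Int) (h : (xs.length : Int) ≤ t) :
    pvPadLines xs t false = xs ++ List.replicate (t - xs.length).toNat "" := by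
  unfold pvPadLines
  simp only [PySem.List.len_eq]
  split
  · next hle =>
    have : (t - (xs.length : Int)).toNat = 0 := by omega
    simp [this]
  · rfl

lemma foldl_max_of_le (l : List Int) (a : Int) (h : ∀ x ∈ l, x ≤ a) :
    l.foldl max a = a := by
  induction l generalizing a with
  | nil => rfl
  | cons x t ih =>
    have hx : max a x = a := by
      have := h x (by simp)
      omega
    rw [List.foldl_cons, hx]
    exact ih a (fun y hy => h y (by simp [hy]))

set_option maxRecDepth 8192 in
lemma icon_len_map : pvIcon.map PySem.Str.len = 27 :: List.replicate 18 27 := by decide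

-- the left width A computes over the padded left block equals 27 for every padding amount
lemma left_width_eq (k : Nat) :
    (match (pvIcon ++ List.replicate k "").map PySem.Str.len with
     | [] => (0 : Int)
     | x :: t => t.foldl max x) = 27 := by
  have hmap : (pvIcon ++ List.replicate k "").map PySem.Str.len
      = 27 :: (List.replicate 18 (27 : Int) ++ List.replicate k 0) := by
    rw [List.map_append, icon_len_map, List.map_replicate]
    rfl
  rw [hmap]
  exact foldl_max_of_le _ 27 (by
    intro x hx
    rcases List.mem_append.mp hx with h | h <;>
      simp_all [List.eq_of_mem_replicate h])

-- padding both blocks to the common height and zipping = one indexed pass with an empty-string fill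
lemma zip_pad_eq_range {α : Type} (f : String → String → α) (xs ys : List String) :
    ((xs ++ List.replicate (max xs.length ys.length - xs.length) "").zip
      (ys ++ List.replicate (max xs.length ys.length - ys.length) "")).map (fun p => f p.1 p.2)
    = (List.range (max xs.length ys.length)).map (fun i =>
        f (if h : i < xs.length then xs[i] else "") (if h : i < ys.length then ys[i] else "")) := by
  apply List.ext_getElem
  · simp
  · intro i h1 h2
    simp only [List.getElem_map, List.getElem_zip, List.getElem_range]
    have hi : i < max xs.length ys.length := by simpa using h2
    by_cases hx : i < xs.length <;> by_cases hy : i < ys.length <;>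
      simp [List.getElem_append, hx, hy]

lemma dite_getD (l : List String) (i : Nat) :
    (if h : i < l.length then l[i] else "") = l.getD i "" := by
  by_cases h : i < l.length <;>
    simp [h, List.getD_eq_getElem?_getD]

lemma pvRows1_fst (sep : String) (ic rem : List String) :
    (pvRows1 sep ic rem).1 = (List.range ic.length).map
      (fun i => String.ofList ((ic.getD i "").toList ++ sep.toList ++ (rem.getD i "").toList)) := by
  induction ic generalizing rem with
  | nil => simp [pvRows1]
  | cons a t ih =>
    cases rem with
    | nil =>
      simp [pvRows1, List.range_succ_eq_map, ih, List.map_map, Function.comp_def]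
    | cons x xs =>
      simp [pvRows1, List.range_succ_eq_map, ih, List.map_map, Function.comp_def]

lemma pvRows1_snd (sep : String) (ic rem : List String) :
    (pvRows1 sep ic rem).2 = rem.drop ic.length := by
  induction ic generalizing rem with
  | nil => simp [pvRows1]
  | cons a t ih =>
    cases rem with
    | nil => simp [pvRows1, ih]
    | cons x xs => simp [pvRows1, ih]

lemma icon_len_all : ∀ s ∈ pvIcon, PySem.Str.len s = 27 := by decide

lemma ljust_icon (i : Nat) (h : i < pvIcon.length) :
    pvLjust (pvIcon.getD i "") 27 = (pvIcon.getD i "").toList := by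
  have hm : pvIcon.getD i "" ∈ pvIcon := by
    rw [← dite_getD]; simp [h]
  have hlen := icon_len_all _ hm
  unfold pvLjust
  rw [hlen]
  norm_num

lemma ljust_blank : pvLjust "" 27 = List.replicate 27 ' ' := by decide

lemma blank_eq : List.replicate (PySem.Str.len (pvIcon.headD "")).toNat ' '
    = List.replicate 27 ' ' := by decide

-- the single indexed pass splits into B's two stages
set_option maxHeartbeats 1000000 in
lemma range_split (sep : String) (rb : List String) :
    (List.range (max pvIcon.length rb.length)).map (fun i =>
      String.ofList (pvLjust (if h : i < pvIcon.length then pvIcon[i] else "") 27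
        ++ sep.toList ++ (if h : i < rb.length then rb[i] else "").toList))
    = (pvRows1 sep pvIcon rb).1
      ++ (rb.drop pvIcon.length).map (fun rest =>
          String.ofList (List.replicate 27 ' ' ++ sep.toList ++ rest.toList)) := by
  rw [pvRows1_fst]
  have hN : pvIcon.length = 19 := by decide
  by_cases hle : rb.length ≤ pvIcon.length
  · have hmax : max pvIcon.length rb.length = pvIcon.length := Nat.max_eq_left hle
    have hdrop : rb.drop pvIcon.length = [] := List.drop_eq_nil_of_le hle
    rw [hmax, hdrop, List.map_nil, List.append_nil]
    apply List.map_congr_left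
    intro i hi
    have hi' : i < pvIcon.length := List.mem_range.mp hi
    rw [dite_getD, dite_getD, ljust_icon i hi']
  · have hk : max pvIcon.length rb.length = pvIcon.length + (rb.length - pvIcon.length) := by
      omega
    rw [hk, List.range_add, List.map_append, List.map_map]
    refine congrArg₂ (· ++ ·) ?_ ?_
    · apply List.map_congr_left
      intro i hi
      have hi' : i < pvIcon.length := List.mem_range.mp hi
      rw [dite_getD, dite_getD, ljust_icon i hi']
    · apply List.ext_getElem
      · simp
      · intro j h1 h2
        have hj : j < rb.length - pvIcon.length := by simpa using h1
        simp only [List.getElem_map, List.getElem_range, Function.comp_apply]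
        have hni : ¬ (pvIcon.length + j < pvIcon.length) := by omega
        have hyi : pvIcon.length + j < rb.length := by omega
        rw [dite_getD, dite_getD]
        have h1' : pvIcon.getD (pvIcon.length + j) "" = "" := by
          rw [← dite_getD]; simp [hni]
        have h2' : rb.getD (pvIcon.length + j) "" = rb[pvIcon.length + j] := by
          rw [← dite_getD]; simp [hyi]
        rw [h1', h2', List.getElem_drop]
        simp [ljust_blank]

lemma body_eq (sep : String) (rb : List String) :
    (let height : Int := max (PySem.List.len pvIcon) (PySem.List.len rb)
     let left := pvPadLines pvIcon height false
     let right := pvPadLines rb height false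
     let left_width : Int :=
       match left.map PySem.Str.len with
       | [] => 0
       | x :: t => t.foldl max x
     PySem.Str.join "\n" ((left.zip right).map (fun p =>
       String.ofList (pvLjust p.1 left_width ++ sep.toList ++ p.2.toList))))
    = PySem.Str.join "\n" ((pvRows1 sep pvIcon rb).1
        ++ (rb.drop pvIcon.length).map (fun rest =>
            String.ofList (List.replicate 27 ' ' ++ sep.toList ++ rest.toList))) := by
  have hh : (max (PySem.List.len pvIcon) (PySem.List.len rb))
      = ((max pvIcon.length rb.length : Nat) : Int) := by
    simp [PySem.List.len_eq, Nat.cast_max]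
  simp only [hh]
  rw [pvPadLines_of_le pvIcon _ (by exact_mod_cast Nat.le_max_left _ _),
      pvPadLines_of_le rb _ (by exact_mod_cast Nat.le_max_right _ _)]
  have hk1 : (((max pvIcon.length rb.length : Nat) : Int) - (pvIcon.length : Int)).toNat
      = max pvIcon.length rb.length - pvIcon.length := by omega
  have hk2 : (((max pvIcon.length rb.length : Nat) : Int) - (rb.length : Int)).toNat
      = max pvIcon.length rb.length - rb.length := by omega
  rw [hk1, hk2, left_width_eq]
  rw [zip_pad_eq_range (fun l r => String.ofList (pvLjust l 27 ++ sep.toList ++ r.toList)) pvIcon rb]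
  rw [range_split]

-- B's body with the iterator leftover and blank width written out
lemma alt_eq (sep : String) (rb : List String) :
    PySem.Str.join "\n" ((pvRows1 sep pvIcon rb).1
        ++ ((pvRows1 sep pvIcon rb).2).map (fun rest =>
            String.ofList (List.replicate (PySem.Str.len (pvIcon.headD "")).toNat ' '
              ++ sep.toList ++ rest.toList)))
    = PySem.Str.join "\n" ((pvRows1 sep pvIcon rb).1
        ++ (rb.drop pvIcon.length).map (fun rest =>
            String.ofList (List.replicate 27 ' ' ++ sep.toList ++ rest.toList))) := by
  rw [blank_eq, pvRows1_snd]

-- ===== VERDICT (by name: the statement is the Claim_ definition above) =====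
theorem render_banner_spec : Claim_equal_render_banner := by
  intro sep extras _
  show render_banner sep extras = render_banner_alt sep extras
  cases extras with
  | none => exact (body_eq sep pvBunkr).trans (alt_eq sep pvBunkr).symm
  | some l =>
    cases l with
    | nil => exact (body_eq sep pvBunkr).trans (alt_eq sep pvBunkr).symm
    | cons x xs =>
      exact (body_eq sep (pvBunkr ++ (x :: xs))).trans (alt_eq sep (pvBunkr ++ (x :: xs))).symm
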